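-- pv_equiv track=rewrite | github.com/kiraskywing/Code_Practice | CodeSignal/construct-new-string.py | solution
-- ===== SOURCE A (Python) =====
-- import collections
--
-- def solution(arr):
--     queue = collections.deque([])
--     for i in range(len(arr)):
--         if arr[i]:
--             queue.append((i, 0))
--
--     res = []
--     while queue:
--         i, j = queue.popleft()
--         res.append(arr[i][j])
--         j += 1
--
--         if j < len(arr[i]):
--             queue.append((i, j))
--
--     return ''.join(res)
-- ===== SOURCE B (Python) =====
-- def solution(arr):
--     m = max((len(s) for s in arr), default=0)
--     res = []
--     for j in range(m):
--         for s in arr: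
--             if j < len(s):
--                 res.append(s[j])
--     return ''.join(res)
-- ===== Notes on version B (the rewrite author's own statement) =====
-- stated objective: simpler
-- what changed: Replaces the deque round-robin simulation (queue of (index, position) pairs, pop/re-append) with direct nested iteration: outer loop over column index up to the maximum string length, inner loop over the strings, appending s[j] when j < len(s); no queue is maintained.
import Mathlib
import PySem

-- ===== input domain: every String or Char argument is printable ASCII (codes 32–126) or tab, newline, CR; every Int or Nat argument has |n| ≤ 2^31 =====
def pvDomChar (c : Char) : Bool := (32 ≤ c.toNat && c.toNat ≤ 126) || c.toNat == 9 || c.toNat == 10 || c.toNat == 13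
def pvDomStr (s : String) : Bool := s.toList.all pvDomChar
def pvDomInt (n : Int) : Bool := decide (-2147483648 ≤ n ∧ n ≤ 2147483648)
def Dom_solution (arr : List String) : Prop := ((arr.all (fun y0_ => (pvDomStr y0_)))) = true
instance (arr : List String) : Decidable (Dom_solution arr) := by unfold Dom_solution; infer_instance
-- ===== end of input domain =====

-- B replaces A's deque round-robin (queue of (index, position) pairs) with direct nested
-- column-then-row loops bounded by the maximum string length; same output, no queue (simpler).

-- ===== PORT A =====
-- termination measure for the while-queue loop: remaining characters of the queued tails
def pvMeasure (ls : List (List Char)) (q : List (Nat × Nat)) : Nat :=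
  (q.map (fun p => (ls[p.1]?.getD []).length - p.2)).sum

-- termination facts, cited by name from aLoop's decreasing_by
theorem pvDec_push (ls : List (List Char)) (i j : Nat) (rest : List (Nat × Nat))
    (h : j + 1 < (ls[i]?.getD []).length) :
    2 * pvMeasure ls (rest ++ [(i, j + 1)]) + (rest ++ [(i, j + 1)]).length
      < 2 * pvMeasure ls ((i, j) :: rest) + ((i, j) :: rest).length := by
  simp only [pvMeasure, List.map_cons, List.sum_cons, List.map_append, List.sum_append,
    List.map_nil, List.sum_nil, List.length_append, List.length_cons, List.length_nil]
  omega

theorem pvDec_pop (ls : List (List Char)) (i j : Nat) (rest : List (Nat × Nat)) :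
    2 * pvMeasure ls rest + rest.length
      < 2 * pvMeasure ls ((i, j) :: rest) + ((i, j) :: rest).length := by
  simp only [pvMeasure, List.map_cons, List.sum_cons, List.length_cons]
  omega

-- the while-queue loop; arr[i][j] via getD is exact because the loop only ever holds j < len(arr[i])
def aLoop (ls : List (List Char)) (q : List (Nat × Nat)) (res : List Char) : List Char :=
  match q with
  | [] => res
  | (i, j) :: rest =>
      let c := (ls[i]?.getD [])[j]?.getD ' '
      if h : j + 1 < (ls[i]?.getD []).length then
        aLoop ls (rest ++ [(i, j + 1)]) (res ++ [c])
      else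
        aLoop ls rest (res ++ [c])
termination_by 2 * pvMeasure ls q + q.length
decreasing_by
  · exact pvDec_push ls i j rest h
  · exact pvDec_pop ls i j rest

def solution (arr : List String) : String :=
  let ls := arr.map String.toList
  let queue := (List.range ls.length).foldl
    (fun q i => if ls[i]?.getD [] ≠ [] then q ++ [(i, 0)] else q) []
  String.ofList (aLoop ls queue [])

-- ===== PORT B =====
def solution_alt (arr : List String) : String :=
  let ls := arr.map String.toList
  let m := ls.foldl (fun acc s => max acc s.length) 0
  String.ofList ((List.range m).foldl
    (fun res j => ls.foldl (fun r s => if j < s.length then r ++ [s[j]?.getD ' '] else r) res) [])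

-- ===== PRECONDITION & SPEC =====
def Spec_solution (arr : List String) (out : String) : Prop := out = solution_alt arr
instance (arr : List String) (out : String) : Decidable (Spec_solution arr out) := by unfold Spec_solution; infer_instance

-- ===== CLAIM (what is proved, stated in full; the proofs are below) =====
def Claim_equal_solution : Prop := ∀ (arr : List String), Dom_solution arr → Spec_solution arr (solution arr)

-- ===== LEMMAS AND PROOFS =====

-- column j of characters, as B's inner loop produces it
def colChars (ls : List (List Char)) (j : Nat) : List Char :=
  ls.filterMap (fun s => if j < s.length then some (s[j]?.getD ' ') else none)

-- column j of queue entries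
def colQ (ls : List (List Char)) (j : Nat) : List (Nat × Nat) :=
  (List.range ls.length).filterMap
    (fun i => if j < (ls[i]?.getD []).length then some (i, j) else none)

-- the push made by processing one queue entry
def pushFn (ls : List (List Char)) (p : Nat × Nat) : Option (Nat × Nat) :=
  if p.2 + 1 < (ls[p.1]?.getD []).length then some (p.1, p.2 + 1) else none

-- bridge: a filterMap over range-with-lookup is a filterMap over the list itself
theorem filterMap_range_getD {β : Type} (ls : List (List Char)) (f : List Char → Option β) :
    (List.range ls.length).filterMap (fun i => f (ls[i]?.getD [])) = ls.filterMap f := by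
  induction ls with
  | nil => simp
  | cons s t ih =>
      simp only [List.length_cons, List.range_succ_eq_map, List.filterMap_cons,
        List.filterMap_map]
      cases hf : f s <;> simp [Function.comp, hf, ← ih]

-- one round of the while loop: processing a block E appends its chars and queues its pushes
theorem aLoop_round (ls : List (List Char)) :
    ∀ (E P : List (Nat × Nat)) (res : List Char),
      aLoop ls (E ++ P) res = aLoop ls (P ++ E.filterMap (pushFn ls)) (res ++ E.map (fun p => (ls[p.1]?.getD [])[p.2]?.getD ' ')) := by
  intro E
  induction E with
  | nil => simp
  | cons p E' ih =>
      intro P res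
      obtain ⟨i, j⟩ := p
      rw [List.cons_append, aLoop]
      by_cases h : j + 1 < (ls[i]?.getD []).length
      · simp only [h, dif_pos, List.append_assoc]
        rw [ih (P ++ [(i, j + 1)]) (res ++ [(ls[i]?.getD [])[j]?.getD ' '])]
        simp only [List.filterMap_cons, pushFn, h, if_pos, List.map_cons, List.append_assoc,
          List.singleton_append, List.cons_append, List.nil_append]
      · simp only [h, dif_neg, not_false_iff]
        rw [show E' ++ P = E' ++ (P ++ []) from by simp,
          ih (P ++ []) (res ++ [(ls[i]?.getD [])[j]?.getD ' '])]
        simp [List.filterMap_cons, pushFn, h]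

-- processed pushes of column j form column j+1
theorem pushes_colQ (ls : List (List Char)) (j : Nat) :
    (colQ ls j).filterMap (pushFn ls) = colQ ls (j + 1) := by
  unfold colQ
  rw [List.filterMap_filterMap]
  apply List.filterMap_congr
  intro i _
  by_cases h1 : j < (ls[i]?.getD []).length <;>
    by_cases h2 : j + 1 < (ls[i]?.getD []).length <;>
    simp [h1, h2, pushFn] <;> omega

-- chars of column-j queue entries = column j of characters
theorem chars_colQ (ls : List (List Char)) (j : Nat) :
    (colQ ls j).map (fun p => (ls[p.1]?.getD [])[p.2]?.getD ' ') = colChars ls j := by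
  unfold colQ colChars
  rw [List.map_filterMap,
    ← filterMap_range_getD ls (fun s => if j < s.length then some (s[j]?.getD ' ') else none)]
  apply List.filterMap_congr
  intro i _
  by_cases h : j < (ls[i]?.getD []).length <;> simp [h]

-- running the loop from the column-j queue emits columns j, j+1, …, j+k-1
theorem aLoop_cols (ls : List (List Char)) :
    ∀ (k j : Nat) (res : List Char), (∀ s ∈ ls, s.length ≤ j + k) →
      aLoop ls (colQ ls j) res = res ++ ((List.range' j k).map (colChars ls)).flatten := by
  intro k
  induction k with
  | zero =>
      intro j res hb
      have hq : colQ ls j = [] := by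
        unfold colQ
        rw [List.filterMap_eq_nil_iff]
        intro i hi
        have hi' : i < ls.length := List.mem_range.mp hi
        have hlen : (ls[i]?.getD []).length ≤ j := by
          have h1 : ls[i]?.getD [] = ls[i] := by simp [hi']
          rw [h1]
          simpa using hb ls[i] (ls.getElem_mem hi')
        rw [if_neg]; omega
      rw [hq, aLoop]; simp
  | succ k ih =>
      intro j res hb
      have h1 : aLoop ls (colQ ls j ++ []) res
          = aLoop ls ([] ++ (colQ ls j).filterMap (pushFn ls))
              (res ++ (colQ ls j).map (fun p => (ls[p.1]?.getD [])[p.2]?.getD ' ')) :=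
        aLoop_round ls (colQ ls j) [] res
      rw [List.append_nil] at h1
      rw [h1, List.nil_append, pushes_colQ, chars_colQ,
        ih (j + 1) _ (fun s hs => by have := hb s hs; omega)]
      rw [List.range'_succ]
      simp

-- B's inner loop is res ++ colChars
theorem inner_loop (ls : List (List Char)) (j : Nat) :
    ∀ res, ls.foldl (fun r s => if j < s.length then r ++ [s[j]?.getD ' '] else r) res = res ++ colChars ls j := by
  induction ls with
  | nil => simp [colChars]
  | cons s t ih =>
      intro res
      rw [List.foldl_cons]
      by_cases h : j < s.length
      · rw [if_pos h, ih]
        simp [colChars, List.filterMap_cons, h]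
      · rw [if_neg h, ih]
        simp [colChars, List.filterMap_cons, h]

-- B's outer loop flattens the columns
theorem outer_loop (ls : List (List Char)) :
    ∀ (js : List Nat) (res : List Char),
      js.foldl (fun res j => ls.foldl (fun r s => if j < s.length then r ++ [s[j]?.getD ' '] else r) res) res
        = res ++ (js.map (colChars ls)).flatten := by
  intro js
  induction js with
  | nil => simp
  | cons j t ih =>
      intro res
      rw [List.foldl_cons, inner_loop, ih]
      simp

-- the initial accumulator bounds the running max
theorem init_le_foldl_max (ls : List (List Char)) :
    ∀ a : Nat, a ≤ ls.foldl (fun acc s => max acc s.length) a := by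
  induction ls with
  | nil => simp
  | cons x t ih =>
      intro a
      exact le_trans (le_max_left a x.length) (ih (max a x.length))

-- the running max bounds every length
theorem le_foldl_max_len (ls : List (List Char)) :
    ∀ (a : Nat) (s : List Char), s ∈ ls → s.length ≤ ls.foldl (fun acc s => max acc s.length) a := by
  induction ls with
  | nil => intro _ _ h; cases h
  | cons x t ih =>
      intro a s hs
      rcases List.mem_cons.mp hs with rfl | hs
      · exact le_trans (le_max_right a s.length) (init_le_foldl_max t (max a s.length))
      · exact ih _ s hs

-- A's initial queue is column 0
theorem init_queue (ls : List (List Char)) :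
    (List.range ls.length).foldl (fun q i => if ls[i]?.getD [] ≠ [] then q ++ [(i, (0 : Nat))] else q) []
      = colQ ls 0 := by
  have h : ∀ (r : List Nat) (q : List (Nat × Nat)),
      r.foldl (fun q i => if ls[i]?.getD [] ≠ [] then q ++ [(i, (0 : Nat))] else q) q
        = q ++ r.filterMap (fun i => if ls[i]?.getD [] ≠ [] then some (i, (0 : Nat)) else none) := by
    intro r
    induction r with
    | nil => simp
    | cons i t ih =>
        intro q
        rw [List.foldl_cons, List.filterMap_cons]
        by_cases h : ls[i]?.getD [] = []
        · simp only [h, ne_eq, not_true_eq_false, if_false, ih]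
        · simp only [h, ne_eq, not_false_eq_true, if_true, ih]
          simp
  rw [h, List.nil_append]
  unfold colQ
  apply List.filterMap_congr
  intro i _
  by_cases h : ls[i]?.getD [] = []
  · simp [h]
  · rw [if_pos (by simpa using h), if_pos (by simp [List.length_pos_iff, h])]

-- ===== VERDICT (by name: the statement is the Claim_ definition above) =====
theorem solution_spec : Claim_equal_solution := by
  intro arr _
  unfold Spec_solution solution solution_alt
  simp only []
  set ls := arr.map String.toList with hls
  set m := ls.foldl (fun acc s => max acc s.length) 0 with hm
  congr 1
  rw [init_queue, aLoop_cols ls m 0 [] (fun s hs => by simpa using le_foldl_max_len ls 0 s hs),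
    outer_loop, List.range_eq_range']
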